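-- pv_equiv track=rewrite | github.com/NadjaKenic/ms-probability | disk-braun.py | get_ring_pixels
-- ===== SOURCE A (Python) =====
-- def get_ring_pixels(cx, cy, radius, w, h):
--     """Vrati samo piksele na prstenu udaljenosti 'radius' od centra (cx, cy)."""
--     pixels = []
--     for dx in range(-radius, radius + 1):
--         for dy in range(-radius, radius + 1):
--             nx, ny = cx + dx, cy + dy
--             if 0 <= nx < w and 0 <= ny < h:
--                 # Udaljenost od centra u Manhattan metrici
--                 if abs(dx) + abs(dy) == radius:
--                     pixels.append((nx, ny))
--     return pixels
-- ===== SOURCE B (Python) =====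
-- def get_ring_pixels(cx, cy, radius, w, h):
--     """Vrati samo piksele na prstenu udaljenosti 'radius' od centra (cx, cy)."""
--     if radius < 0:
--         cands = []
--     elif radius == 0:
--         cands = [(cx, cy)]
--     else:
--         cands = [(cx - radius, cy)]
--         for dx in range(-radius + 1, radius):
--             k = radius - abs(dx)
--             cands.append((cx + dx, cy - k))
--             cands.append((cx + dx, cy + k))
--         cands.append((cx + radius, cy))
--     return [(x, y) for (x, y) in cands if 0 <= x < w and 0 <= y < h]
-- ===== Notes on version B (the rewrite author's own statement) =====
-- stated objective: faster
-- what changed: A scans the full (2r+1)x(2r+1) square testing |dx|+|dy|==radius per cell with the bounds check inlined; B builds the diamond border explicitly in two staged passes - the two tips plus two mirrored points per interior dx are generated first, then a single comprehension filters for bounds.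
import Mathlib
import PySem

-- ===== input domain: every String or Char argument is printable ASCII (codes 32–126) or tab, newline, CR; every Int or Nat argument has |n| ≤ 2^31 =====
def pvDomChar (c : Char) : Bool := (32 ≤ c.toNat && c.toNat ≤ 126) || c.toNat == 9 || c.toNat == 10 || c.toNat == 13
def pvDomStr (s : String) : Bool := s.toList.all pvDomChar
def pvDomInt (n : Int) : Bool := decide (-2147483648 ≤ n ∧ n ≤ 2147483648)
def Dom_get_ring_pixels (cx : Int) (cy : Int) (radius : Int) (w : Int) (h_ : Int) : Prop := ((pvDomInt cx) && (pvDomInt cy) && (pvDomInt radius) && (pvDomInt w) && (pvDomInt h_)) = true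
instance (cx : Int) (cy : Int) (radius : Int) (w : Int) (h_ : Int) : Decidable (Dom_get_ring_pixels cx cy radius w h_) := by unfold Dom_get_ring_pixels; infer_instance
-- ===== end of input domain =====

-- B replaces A's O(radius^2) full-square scan by a staged O(radius) construction:
-- first generate the diamond border (tips plus two mirrored points per interior dx),
-- then filter the candidates for image bounds in a second pass; same return value.

-- ===== PORT A =====
def get_ring_pixels (cx : Int) (cy : Int) (radius : Int) (w : Int) (h_ : Int) : List (Int × Int) :=
  (PySem.List.pyRange (-radius) (radius + 1) 1).foldl (fun pixels dx =>
    (PySem.List.pyRange (-radius) (radius + 1) 1).foldl (fun pixels dy =>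
      if 0 ≤ cx + dx ∧ cx + dx < w ∧ 0 ≤ cy + dy ∧ cy + dy < h_ then
        if |dx| + |dy| = radius then pixels ++ [(cx + dx, cy + dy)] else pixels
      else pixels) pixels) []

-- ===== PORT B =====
def get_ring_pixels_alt (cx : Int) (cy : Int) (radius : Int) (w : Int) (h_ : Int) : List (Int × Int) :=
  let cands : List (Int × Int) :=
    if radius < 0 then []
    else if radius = 0 then [(cx, cy)]
    else
      ((PySem.List.pyRange (-radius + 1) radius 1).foldl (fun c dx =>
        let k := radius - |dx|
        c ++ [(cx + dx, cy - k)] ++ [(cx + dx, cy + k)]) [(cx - radius, cy)])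
      ++ [(cx + radius, cy)]
  cands.filter (fun p => decide (0 ≤ p.1 ∧ p.1 < w ∧ 0 ≤ p.2 ∧ p.2 < h_))

-- ===== PRECONDITION & SPEC =====
def Spec_get_ring_pixels (cx : Int) (cy : Int) (radius : Int) (w : Int) (h_ : Int) (out : List (Int × Int)) : Prop := out = get_ring_pixels_alt cx cy radius w h_
instance (cx : Int) (cy : Int) (radius : Int) (w : Int) (h_ : Int) (out : List (Int × Int)) : Decidable (Spec_get_ring_pixels cx cy radius w h_ out) := by unfold Spec_get_ring_pixels; infer_instance

-- ===== CLAIM (what is proved, stated in full; the proofs are below) =====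
def Claim_equal_get_ring_pixels : Prop := ∀ (cx : Int) (cy : Int) (radius : Int) (w : Int) (h_ : Int), Dom_get_ring_pixels cx cy radius w h_ → Spec_get_ring_pixels cx cy radius w h_ (get_ring_pixels cx cy radius w h_)

-- ===== LEMMAS AND PROOFS =====

-- the unfiltered ring candidates contributed by one column dx (|dx| ≤ r)
def ringCand (cx cy r dx : Int) : List (Int × Int) :=
  if r - |dx| = 0 then [(cx + dx, cy)]
  else [(cx + dx, cy - (r - |dx|)), (cx + dx, cy + (r - |dx|))]

def inBounds (w h_ : Int) (p : Int × Int) : Bool :=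
  decide (0 ≤ p.1 ∧ p.1 < w ∧ 0 ≤ p.2 ∧ p.2 < h_)

-- filtering dy-offsets then mapping to points = mapping then filtering the points
theorem map_filter_col (x cy w h_ : Int) (dys : List Int) :
    (dys.filter (fun dy => decide (0 ≤ x ∧ x < w ∧ 0 ≤ cy + dy ∧ cy + dy < h_))).map
        (fun dy => (x, cy + dy)) =
      (dys.map (fun dy => (x, cy + dy))).filter (inBounds w h_) := by
  induction dys with
  | nil => simp
  | cons d t ih =>
    have hb : inBounds w h_ (x, cy + d) = decide (0 ≤ x ∧ x < w ∧ 0 ≤ cy + d ∧ cy + d < h_) := by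
      simp [inBounds]
    simp only [List.filter_cons, List.map_cons, hb]
    cases hd : decide (0 ≤ x ∧ x < w ∧ 0 ≤ cy + d ∧ cy + d < h_)
    · simp only [Bool.false_eq_true, if_false]
      exact ih
    · simp only [if_true, List.map_cons]
      rw [ih]

-- the dy values in [-r, r+1) whose absolute value is k (0 ≤ k ≤ r): exactly -k and k
theorem filter_abs_eq (r k : Int) (hk0 : 0 ≤ k) (hkr : k ≤ r) :
    (PySem.List.pyRange (-r) (r + 1) 1).filter (fun dy => decide (|dy| = k)) =
      (if k = 0 then [(0 : Int)] else [-k, k]) := by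
  have habs : ∀ x : Int, (|x| = k) ↔ (x = k ∨ x = -k) := fun x => abs_eq hk0
  have hnil : ∀ a b : Int, (∀ x, a ≤ x → x < b → ¬(x = k ∨ x = -k)) →
      (PySem.List.pyRange a b 1).filter (fun dy => decide (|dy| = k)) = [] := by
    intro a b h
    refine List.filter_eq_nil_iff.mpr ?_
    intro x hx
    rw [PySem.List.mem_pyRange_one] at hx
    simp [habs]
    have := h x hx.1 hx.2
    tauto
  by_cases h0 : k = 0
  · subst h0
    rw [PySem.List.pyRange_one_append (-r) 0 (r + 1) (by omega) (by omega),
        PySem.List.pyRange_one_append 0 1 (r + 1) (by omega) (by omega)]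
    have e1 : PySem.List.pyRange 0 1 1 = [(0 : Int)] := by
      have := PySem.List.pyRange_one_singleton (0 : Int)
      simpa using this
    rw [List.filter_append, List.filter_append, e1,
        hnil (-r) 0 (by intro x h1 h2; omega),
        hnil 1 (r + 1) (by intro x h1 h2; omega)]
    simp [habs]
  · rw [PySem.List.pyRange_one_append (-r) (-k) (r + 1) (by omega) (by omega),
        PySem.List.pyRange_one_append (-k) (-k + 1) (r + 1) (by omega) (by omega),
        PySem.List.pyRange_one_append (-k + 1) k (r + 1) (by omega) (by omega),
        PySem.List.pyRange_one_append k (k + 1) (r + 1) (by omega) (by omega)]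
    have e1 : PySem.List.pyRange (-k) (-k + 1) 1 = [-k] := PySem.List.pyRange_one_singleton (-k)
    have e2 : PySem.List.pyRange k (k + 1) 1 = [k] := PySem.List.pyRange_one_singleton k
    rw [List.filter_append, List.filter_append, List.filter_append, List.filter_append,
        e1, e2,
        hnil (-r) (-k) (by intro x h1 h2; omega),
        hnil (-k + 1) k (by intro x h1 h2; omega),
        hnil (k + 1) (r + 1) (by intro x h1 h2; omega)]
    simp [habs, h0]

-- A's inner dy-loop, for a fixed admissible dx, yields the filtered column candidates
theorem inner_eq (cx cy w h_ r dx : Int) (hdx : -r ≤ dx ∧ dx < r + 1)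
    (pixels : List (Int × Int)) :
    (PySem.List.pyRange (-r) (r + 1) 1).foldl (fun pixels dy =>
      if 0 ≤ cx + dx ∧ cx + dx < w ∧ 0 ≤ cy + dy ∧ cy + dy < h_ then
        if |dx| + |dy| = r then pixels ++ [(cx + dx, cy + dy)] else pixels
      else pixels) pixels =
    pixels ++ (ringCand cx cy r dx).filter (inBounds w h_) := by
  have hdxabs : |dx| ≤ r := abs_le.mpr (by omega)
  have habs0 := abs_nonneg dx
  have hL : (PySem.List.pyRange (-r) (r + 1) 1).foldl (fun pixels dy =>
      if 0 ≤ cx + dx ∧ cx + dx < w ∧ 0 ≤ cy + dy ∧ cy + dy < h_ then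
        if |dx| + |dy| = r then pixels ++ [(cx + dx, cy + dy)] else pixels
      else pixels) pixels =
      (PySem.List.pyRange (-r) (r + 1) 1).foldl (fun pixels dy =>
      if (|dy| = r - |dx|) ∧ (0 ≤ cx + dx ∧ cx + dx < w ∧ 0 ≤ cy + dy ∧ cy + dy < h_) then
        pixels ++ [(cx + dx, cy + dy)]
      else pixels) pixels := by
    apply PySem.List.foldl_congr_mem
    intro acc dy _
    by_cases hb : 0 ≤ cx + dx ∧ cx + dx < w ∧ 0 ≤ cy + dy ∧ cy + dy < h_ <;>
      by_cases hm : |dy| = r - |dx| <;>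
      simp [hb, hm] <;> omega
  rw [hL, PySem.List.foldl_append_ite]
  congr 1
  have hfilter : (PySem.List.pyRange (-r) (r + 1) 1).filter
      (fun dy => decide ((|dy| = r - |dx|) ∧ (0 ≤ cx + dx ∧ cx + dx < w ∧ 0 ≤ cy + dy ∧ cy + dy < h_))) =
      ((if r - |dx| = 0 then [(0 : Int)] else [-(r - |dx|), r - |dx|]).filter
      (fun dy => decide (0 ≤ cx + dx ∧ cx + dx < w ∧ 0 ≤ cy + dy ∧ cy + dy < h_))) := by
    rw [← filter_abs_eq r (r - |dx|) (by omega) (by omega), List.filter_filter]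
    exact List.filter_congr (fun x _ => by
      simp [Bool.and_comm, Bool.and_left_comm])
  rw [hfilter, map_filter_col]
  congr 1
  by_cases h0 : r - |dx| = 0
  · simp [h0, ringCand]
  · rw [if_neg h0]
    unfold ringCand
    rw [if_neg h0]
    simp [sub_eq_add_neg]

-- A equals the filtered flat candidate list
theorem A_norm (cx cy r w h_ : Int) :
    get_ring_pixels cx cy r w h_ =
      ((PySem.List.pyRange (-r) (r + 1) 1).flatMap (ringCand cx cy r)).filter (inBounds w h_) := by
  unfold get_ring_pixels
  have h1 : (PySem.List.pyRange (-r) (r + 1) 1).foldl (fun pixels dx =>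
      (PySem.List.pyRange (-r) (r + 1) 1).foldl (fun pixels dy =>
        if 0 ≤ cx + dx ∧ cx + dx < w ∧ 0 ≤ cy + dy ∧ cy + dy < h_ then
          if |dx| + |dy| = r then pixels ++ [(cx + dx, cy + dy)] else pixels
        else pixels) pixels) [] =
      (PySem.List.pyRange (-r) (r + 1) 1).foldl (fun pixels dx =>
        pixels ++ (ringCand cx cy r dx).filter (inBounds w h_)) [] := by
    apply PySem.List.foldl_congr_mem
    intro acc dx hdx
    rw [PySem.List.mem_pyRange_one] at hdx
    exact inner_eq cx cy w h_ r dx hdx acc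
  rw [h1, PySem.List.foldl_append_eq_flatMap]
  simp [List.filter_flatMap]

-- B equals the same filtered flat candidate list
theorem B_norm (cx cy r w h_ : Int) :
    get_ring_pixels_alt cx cy r w h_ =
      ((PySem.List.pyRange (-r) (r + 1) 1).flatMap (ringCand cx cy r)).filter (inBounds w h_) := by
  unfold get_ring_pixels_alt
  rcases lt_trichotomy r 0 with hr | hr | hr
  · rw [PySem.List.pyRange_one_eq_nil (by omega)]
    simp [hr]
  · subst hr
    have e1 : PySem.List.pyRange (0:Int) 1 1 = [(0 : Int)] := by
      have := PySem.List.pyRange_one_singleton (0 : Int)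
      simpa using this
    simp only [neg_zero, zero_add, e1, List.flatMap_cons, List.flatMap_nil, List.append_nil]
    simp [ringCand]
    congr 1
    funext p
    simp [inBounds]
  · have hne : ¬ r < 0 := by omega
    have hne0 : ¬ r = 0 := by omega
    simp only [if_neg hne, if_neg hne0, List.append_assoc]
    rw [PySem.List.foldl_append_eq_flatMap]
    rw [PySem.List.pyRange_one_append (-r) (-r + 1) (r + 1) (by omega) (by omega),
        PySem.List.pyRange_one_append (-r + 1) r (r + 1) (by omega) (by omega)]
    have e1 : PySem.List.pyRange (-r) (-r + 1) 1 = [-r] := PySem.List.pyRange_one_singleton (-r)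
    have e2 : PySem.List.pyRange r (r + 1) 1 = [r] := PySem.List.pyRange_one_singleton r
    rw [e1, e2]
    have hcl : ringCand cx cy r (-r) = [(cx - r, cy)] := by
      unfold ringCand
      rw [abs_of_nonpos (by omega)]
      simp; ring_nf
    have hcr : ringCand cx cy r r = [(cx + r, cy)] := by
      unfold ringCand
      rw [abs_of_nonneg (by omega)]
      simp
    have hmid : (PySem.List.pyRange (-r + 1) r 1).flatMap
        (fun dx => [(cx + dx, cy - (r - |dx|))] ++ [(cx + dx, cy + (r - |dx|))]) =
        (PySem.List.pyRange (-r + 1) r 1).flatMap (ringCand cx cy r) := by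
      rw [List.flatMap, List.flatMap]
      congr 1
      apply List.map_congr_left
      intro dx hdx
      rw [PySem.List.mem_pyRange_one] at hdx
      have : ¬ (r - |dx| = 0) := by
        rcases abs_cases dx with ⟨h, _⟩ | ⟨h, _⟩ <;> omega
      unfold ringCand
      simp [this]
    simp only [List.flatMap_append, List.flatMap_cons, List.flatMap_nil, List.append_nil,
      hcl, hcr]
    rw [hmid]
    apply congrFun
    apply congrArg
    funext p
    simp [inBounds]

-- ===== VERDICT (by name: the statement is the Claim_ definition above) =====
theorem get_ring_pixels_spec : Claim_equal_get_ring_pixels := by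
  intro cx cy radius w h_ _
  unfold Spec_get_ring_pixels
  rw [A_norm, B_norm]
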